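-- pv_equiv track=rewrite | github.com/LeeJeongHwi/Today_Algo | 백준/그리디/1758_알바생 강호/1758.py | solution
-- ===== SOURCE A (Python) =====
-- def solution(N, tips):
--     answer = 0
--     for i, t in enumerate(tips):
--         tip = t-(i)
--         if tip < 0: # 그 뒤로는 어차피 음수가 되기 때문
--             return answer
--         answer+=tip
--     return answer
-- ===== SOURCE B (Python) =====
-- def solution(N, tips):
--     # cutoff-finding pass, then closed-form aggregates (no per-element accumulation)
--     k = len(tips)
--     for i, t in enumerate(tips):
--         if t - i < 0:
--             k = i
--             break
--     return sum(tips[:k]) - k * (k - 1) // 2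
-- ===== Notes on version B (the rewrite author's own statement) =====
-- stated objective: alternative
-- what changed: A's single accumulating pass (adding t-i until it turns negative) is replaced by a non-accumulating scan for the cutoff index k followed by two closed-form aggregates: sum(tips[:k]) minus the triangular number k*(k-1)//2.
import Mathlib
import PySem

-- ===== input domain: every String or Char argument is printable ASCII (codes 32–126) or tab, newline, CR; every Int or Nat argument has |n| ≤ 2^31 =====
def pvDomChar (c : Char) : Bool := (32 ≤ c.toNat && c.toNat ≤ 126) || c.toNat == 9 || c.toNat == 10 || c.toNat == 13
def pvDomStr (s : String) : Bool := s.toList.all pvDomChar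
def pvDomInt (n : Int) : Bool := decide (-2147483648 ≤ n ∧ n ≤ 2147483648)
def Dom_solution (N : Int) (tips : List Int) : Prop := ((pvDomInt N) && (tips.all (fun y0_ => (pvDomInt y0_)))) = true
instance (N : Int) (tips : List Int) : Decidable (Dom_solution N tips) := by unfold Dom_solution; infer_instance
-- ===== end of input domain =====

-- ===== PORT A =====
-- the for-loop over enumerate(tips) with accumulator `answer` and early return
def solLoopA : List (Int × Int) → Int → Int
  | [], answer => answer
  | (i, t) :: rest, answer =>
      let tip := t - i
      if tip < 0 then answer else solLoopA rest (answer + tip)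

def solution (N : Int) (tips : List Int) : Int :=
  solLoopA (PySem.List.enumerate tips) 0

-- ===== PORT B =====
-- B's cutoff-finding loop: first index i with tips[i] - i < 0, else len(tips)
def findCut : List Int → Int → Int
  | [], i => i
  | t :: rest, i => if t - i < 0 then i else findCut rest (i + 1)

def solution_alt (N : Int) (tips : List Int) : Int :=
  let k := findCut tips 0
  (PySem.List.slice tips none (some k)).sum - PySem.Int.floordiv (k * (k - 1)) 2

-- ===== PRECONDITION & SPEC =====
def Spec_solution (N : Int) (tips : List Int) (out : Int) : Prop := out = solution_alt N tips
instance (N : Int) (tips : List Int) (out : Int) : Decidable (Spec_solution N tips out) := by unfold Spec_solution; infer_instance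

-- ===== CLAIM (what is proved, stated in full; the proofs are below) =====
def Claim_equal_solution : Prop := ∀ (N : Int) (tips : List Int), Dom_solution N tips → Spec_solution N tips (solution N tips)

-- ===== LEMMAS AND PROOFS =====

-- number of elements before the cutoff, as a Nat (proof-only helper)
def cnt : List Int → Int → Nat
  | [], _ => 0
  | t :: rest, i => if t - i < 0 then 0 else cnt rest (i + 1) + 1

-- triangular number 0 + 1 + ... + (n-1), as Int (proof-only helper)
def tri : Nat → Int
  | 0 => 0
  | n + 1 => tri n + n

theorem findCut_eq_cnt : ∀ (tips : List Int) (i : Int),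
    findCut tips i = i + (cnt tips i : Int) := by
  intro tips
  induction tips with
  | nil => intro i; simp [findCut, cnt]
  | cons t rest ih =>
      intro i
      by_cases h : t - i < 0 <;> simp [findCut, cnt, h, ih] <;> push_cast <;> ring

theorem two_mul_tri : ∀ n : Nat, (n : Int) * ((n : Int) - 1) = 2 * tri n := by
  intro n
  induction n with
  | zero => simp [tri]
  | succ m ih => simp only [tri]; push_cast; push_cast at ih; ring_nf; ring_nf at ih; omega

theorem solLoopA_eq : ∀ (tips : List Int) (i ans : Int),
    solLoopA (PySem.List.enumerate tips i) ans =
      ans + (tips.take (cnt tips i)).sum - (cnt tips i : Int) * i - tri (cnt tips i) := by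
  intro tips
  induction tips with
  | nil => intro i ans; simp [PySem.List.enumerate_nil, solLoopA, cnt, tri]
  | cons t rest ih =>
      intro i ans
      rw [PySem.List.enumerate_cons]
      by_cases h : t - i < 0
      · simp [solLoopA, cnt, h, tri]
      · simp only [solLoopA, h, if_false, cnt, ih, tri, List.take_succ_cons, List.sum_cons]
        push_cast
        ring

theorem solution_eq_alt : ∀ (N : Int) (tips : List Int),
    solution N tips = solution_alt N tips := by
  intro N tips
  have hA : solution N tips = (tips.take (cnt tips 0)).sum - tri (cnt tips 0) := by
    have := solLoopA_eq tips 0 0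
    simpa [solution, PySem.List.enumerate] using this
  have hk : findCut tips 0 = ((cnt tips 0 : Nat) : Int) := by
    simpa using findCut_eq_cnt tips 0
  have hfd : PySem.Int.floordiv (findCut tips 0 * (findCut tips 0 - 1)) 2 = tri (cnt tips 0) := by
    rw [hk, two_mul_tri, PySem.Int.floordiv_eq_ediv_of_pos (by omega)]
    omega
  have hslice : PySem.List.slice tips none (some (findCut tips 0)) = tips.take (cnt tips 0) := by
    rw [hk, PySem.List.slice_to_natCast]
  rw [hA, solution_alt]
  simp only [hslice, hfd]

-- ===== VERDICT (by name: the statement is the Claim_ definition above) =====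
theorem solution_spec : Claim_equal_solution := by
  intro N tips _
  unfold Spec_solution
  exact solution_eq_alt N tips
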